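-- pv_equiv track=rewrite | github.com/CrazySoda/CSE-318 | Offline-4/CSE 318 Offline 4/Datasets/convert_data_to_csv.py | detect_missing_values
-- ===== SOURCE A (Python) =====
-- def detect_missing_values(data):
--     missing_indicators = set()
--     for row in data:
--         for cell in row:
--             cell_clean = cell.strip()
--             if cell_clean in ['?', '', 'NA', 'na', 'NULL', 'null', 'NaN', 'nan', 'missing']:
--                 missing_indicators.add(cell_clean)
--     return missing_indicators
-- ===== SOURCE B (Python) =====
-- def detect_missing_values(data):
--     n = len(data)
--     if n >= 2:
--         mid = n // 2
--         return detect_missing_values(data[:mid]) | detect_missing_values(data[mid:])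
--     if n == 0:
--         return set()
--     return {cell.strip() for cell in data[0]} & {'?', '', 'NA', 'na', 'NULL', 'null', 'NaN', 'nan', 'missing'}
-- ===== Notes on version B (the rewrite author's own statement) =====
-- stated objective: alternative
-- what changed: A is a single accumulating pass testing each cell against the indicator list; B is a divide-and-conquer recursion that splits the row list in half, solves each half independently, and merges the two result sets with set union (base case: one row handled by a set intersection).
import Mathlib
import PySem

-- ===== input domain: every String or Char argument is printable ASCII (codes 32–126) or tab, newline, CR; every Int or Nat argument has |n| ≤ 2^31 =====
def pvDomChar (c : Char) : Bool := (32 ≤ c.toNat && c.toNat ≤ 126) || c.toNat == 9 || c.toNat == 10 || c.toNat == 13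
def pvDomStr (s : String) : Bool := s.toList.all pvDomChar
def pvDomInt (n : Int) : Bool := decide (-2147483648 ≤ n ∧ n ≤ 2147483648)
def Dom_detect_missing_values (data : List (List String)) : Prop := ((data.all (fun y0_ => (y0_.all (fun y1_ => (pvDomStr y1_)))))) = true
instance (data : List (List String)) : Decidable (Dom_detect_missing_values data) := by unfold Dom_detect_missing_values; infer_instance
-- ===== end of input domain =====

-- B replaces A's single accumulating pass with a divide-and-conquer recursion: split the rows in half, solve each half, merge with set union (alternative decomposition; same cost).


-- ===== PORT A =====
def detect_missing_values (data : List (List String)) : List String :=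
  data.foldl (fun missing_indicators row =>
    row.foldl (fun missing_indicators cell =>
      let cell_clean := PySem.Str.strip cell
      if cell_clean ∈ (["?", "", "NA", "na", "NULL", "null", "NaN", "nan", "missing"] : List String)
      then PySem.Set.add missing_indicators cell_clean
      else missing_indicators) missing_indicators) PySem.Set.empty

-- ===== PORT B =====
def detect_missing_values_alt (data : List (List String)) : List String :=
  if 2 ≤ data.length then
    let mid := data.length / 2
    PySem.Set.union (detect_missing_values_alt (data.take mid)) (detect_missing_values_alt (data.drop mid))
  else
    match data with
    | [] => PySem.Set.empty
    | row :: _ =>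
        PySem.Set.inter (PySem.Set.ofList (row.map PySem.Str.strip))
          (PySem.Set.ofList (["?", "", "NA", "na", "NULL", "null", "NaN", "nan", "missing"] : List String))
termination_by data.length
decreasing_by
  · simp only [List.length_take]; omega
  · simp only [List.length_drop]; omega

-- ===== PRECONDITION & SPEC =====
def Spec_detect_missing_values (data : List (List String)) (out : List String) : Prop := out = detect_missing_values_alt data
instance (data : List (List String)) (out : List String) : Decidable (Spec_detect_missing_values data out) := by unfold Spec_detect_missing_values; infer_instance

-- ===== CLAIM (what is proved, stated in full; the proofs are below) =====
def Claim_equal_detect_missing_values : Prop := ∀ (data : List (List String)), Dom_detect_missing_values data → Spec_detect_missing_values data (detect_missing_values data)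

-- ===== LEMMAS AND PROOFS =====

-- the indicator list, used by the lemmas below
def pvInd : List String := ["?", "", "NA", "na", "NULL", "null", "NaN", "nan", "missing"]

-- a nested foldl over rows is the foldl over the flattened cells
theorem pv_foldl_nested {α β : Type} (g : β → α → β) (data : List (List α)) (init : β) :
    data.foldl (fun acc row => row.foldl g acc) init = (data.flatMap (fun row => row)).foldl g init := by
  induction data generalizing init with
  | nil => rfl
  | cons r rs ih => simp [List.flatMap_cons, List.foldl_append, ih]

-- filtering an add-fold = folding with a membership guard
theorem pv_filter_foldl_add (t : List String) (xs : List String) (s : List String) :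
    (xs.foldl PySem.Set.add s).filter (fun x => PySem.Set.contains t x) =
      xs.foldl (fun a c => if c ∈ t then PySem.Set.add a c else a)
        (s.filter (fun x => PySem.Set.contains t x)) := by
  induction xs generalizing s with
  | nil => rfl
  | cons c cs ih =>
    rw [List.foldl_cons, List.foldl_cons, ih]
    congr 1
    by_cases hs : c ∈ s
    · rw [PySem.Set.add_of_mem hs]
      by_cases ht : c ∈ t
      · rw [if_pos ht, PySem.Set.add_of_mem (by simp [List.mem_filter, hs, ht])]
      · rw [if_neg ht]
    · rw [PySem.Set.add_of_not_mem hs, List.filter_append]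
      by_cases ht : c ∈ t
      · rw [if_pos ht,
          PySem.Set.add_of_not_mem (fun h => hs (List.mem_of_mem_filter h))]
        simp [ht]
      · rw [if_neg ht]
        simp [ht]

theorem pv_filter_ofList (t xs : List String) :
    (PySem.Set.ofList xs).filter (fun x => PySem.Set.contains t x) =
      xs.foldl (fun a c => if c ∈ t then PySem.Set.add a c else a) [] := by
  rw [PySem.Set.ofList_eq_foldl, pv_filter_foldl_add]; rfl

-- A's fold equals the intersection of the deduped stripped cells with the indicator set
theorem pv_A_eq_inter (data : List (List String)) :
    detect_missing_values data =
      PySem.Set.inter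
        (PySem.Set.ofList ((data.flatMap (fun row => row)).map PySem.Str.strip)) pvInd := by
  unfold detect_missing_values PySem.Set.inter
  rw [pv_filter_ofList, pv_foldl_nested, List.foldl_map]
  rfl

-- intersection with a fixed set distributes over set-of-append as a union
theorem pv_inter_ofList_append (T xs ys : List String) :
    PySem.Set.inter (PySem.Set.ofList (xs ++ ys)) T =
      PySem.Set.union (PySem.Set.inter (PySem.Set.ofList xs) T)
        (PySem.Set.inter (PySem.Set.ofList ys) T) := by
  unfold PySem.Set.inter PySem.Set.union
  rw [PySem.Set.ofList_append, PySem.Set.update_eq_append_filter,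
      PySem.Set.update_eq_append_filter, List.filter_append,
      PySem.Set.ofList_eq_self_of_nodup _
        (List.Nodup.filter (fun x => PySem.Set.contains T x) (PySem.Set.nodup_ofList ys))]
  congr 1
  rw [List.filter_filter, List.filter_filter]
  apply List.filter_congr
  intro y _
  by_cases hT : y ∈ T <;> by_cases hx : y ∈ xs <;> simp [hT, hx, List.mem_filter]

-- B equals the intersection form, by strong induction on the number of rows, following B's halving recursion
theorem pv_B_eq_inter (data : List (List String)) :
    detect_missing_values_alt data =
      PySem.Set.inter
        (PySem.Set.ofList ((data.flatMap (fun row => row)).map PySem.Str.strip)) pvInd := by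
  induction hn : data.length using Nat.strong_induction_on generalizing data with
  | _ n ih =>
    rw [detect_missing_values_alt.eq_def]
    by_cases h2 : 2 ≤ data.length
    · rw [if_pos h2]
      have ht := ih (data.take (data.length / 2)).length
        (by simp only [List.length_take]; omega) (data.take (data.length / 2)) rfl
      have hd := ih (data.drop (data.length / 2)).length
        (by simp only [List.length_drop]; omega) (data.drop (data.length / 2)) rfl
      show PySem.Set.union (detect_missing_values_alt (List.take (data.length / 2) data))
          (detect_missing_values_alt (List.drop (data.length / 2) data)) = _
      rw [ht, hd, ← pv_inter_ofList_append, ← List.map_append, ← List.flatMap_append,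
          List.take_append_drop]
    · rw [if_neg h2]
      cases data with
      | nil => rfl
      | cons row rest =>
        cases rest with
        | cons a as =>
          exact absurd (by simp only [List.length_cons]; omega : 2 ≤ (row :: a :: as).length) h2
        | nil =>
          rw [show PySem.Set.ofList
                (["?", "", "NA", "na", "NULL", "null", "NaN", "nan", "missing"] : List String) =
              (["?", "", "NA", "na", "NULL", "null", "NaN", "nan", "missing"] : List String) from
              PySem.Set.ofList_eq_self_of_nodup _ (by decide)]
          simp [pvInd]

-- ===== VERDICT (by name: the statement is the Claim_ definition above) =====
theorem detect_missing_values_spec : Claim_equal_detect_missing_values := by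
  intro data _
  unfold Spec_detect_missing_values
  rw [pv_A_eq_inter, pv_B_eq_inter]
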